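-- pv_equiv track=rewrite | github.com/ThierryHenry1994/cobs-codec | encode.py | cobs_encoded
-- ===== SOURCE A (Python) =====
-- def cobs_encoded(data_in):
--     encode_list = [0]
--     len_data = len(data_in)
--     zero_pos = 0
--     zero_adds = 1
--
--     # copy data to encode_list
--     encode_list.extend(data_in)
--     encode_list.append(0)
--
--     i = 1
--     while i < len(encode_list):
--         temp = encode_list[i]
--         if temp == 0:
--             encode_list[zero_pos] = zero_adds
--             zero_pos += zero_adds
--             zero_adds = 0
--         zero_adds += 1
--         if zero_adds >= 0xFF:
--             encode_list[zero_pos] = 0xFF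
--             if i == len_data:
--                 break
--
--             encode_list.insert(i + 1, 0)
--             i += 1
--             zero_pos += zero_adds
--             zero_adds = 1
--         i += 1
--
--     return encode_list
-- ===== SOURCE B (Python) =====
-- def cobs_encoded(data_in):
--     # One-pass COBS encode: buffer the current zero-free group and flush it
--     # with its code byte; append the frame delimiter at the end.
--     out = []
--     group = []
--     for b in data_in:
--         if b == 0:
--             out.append(len(group) + 1)
--             out.extend(group)
--             group = []
--         else:
--             group.append(b)
--             if len(group) == 254:
--                 out.append(0xFF)
--                 out.extend(group)
--                 group = []
--     out.append(len(group) + 1)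
--     out.extend(group)
--     out.append(0)
--     return out
-- ===== Notes on version B (the rewrite author's own statement) =====
-- stated objective: faster
-- what changed: Replaces A's in-place rewrite of a growing copy of the input (index walk over the mutated list with a mid-list insert() after every full 254-byte group) by a single pass over the input that buffers the current zero-free group and appends it with its code byte to the output.
-- intended difference: On inputs where a full 254-byte group ends exactly at data index n-1-k (k = full groups seen earlier), A's break test 'i == len_data' compares an index into the insert-grown list with the original length and fires at the wrong place, so A returns the remaining bytes unencoded (or, at the true end, drops the final group's code byte); B encodes them normally, the intended COBS output. — e.g. on cobs_encoded([1, 1, 1, 1, 1, 1, 1, 1, 1, 1, 1, 1, 1, 1, 1, 1, 1, 1, 1, 1, 1, 1, 1, 1, 1, 1, 1, 1, 1, 1, 1, 1, 1, 1, 1, 1, 1, 1, 1, 1…): A returns [255, 1, 1, 1, 1, 1, 1, 1, 1, 1, 1, 1, 1, 1, 1, 1, 1, 1, 1, 1, 1, 1, 1, 1, 1, 1, 1, 1, 1, 1, 1, 1, 1, 1, 1, 1, 1, 1, 1,…, B returns [255, 1, 1, 1, 1, 1, 1, 1, 1, 1, 1, 1, 1, 1, 1, 1, 1, 1, 1, 1,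 1, 1, 1, 1, 1, 1, 1, 1, 1, 1, 1, 1, 1, 1, 1, 1, 1, 1, 1,…
import Mathlib
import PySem

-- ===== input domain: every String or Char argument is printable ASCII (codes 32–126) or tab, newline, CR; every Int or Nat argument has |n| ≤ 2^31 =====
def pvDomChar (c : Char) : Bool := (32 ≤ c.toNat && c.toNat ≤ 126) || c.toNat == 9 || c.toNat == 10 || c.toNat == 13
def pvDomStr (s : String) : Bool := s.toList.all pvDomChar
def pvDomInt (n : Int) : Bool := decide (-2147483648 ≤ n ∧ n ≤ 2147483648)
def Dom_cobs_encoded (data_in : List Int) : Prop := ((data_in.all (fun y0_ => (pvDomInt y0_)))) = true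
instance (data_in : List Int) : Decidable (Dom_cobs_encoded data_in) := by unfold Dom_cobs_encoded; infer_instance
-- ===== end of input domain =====

-- B replaces A's in-place rewrite of a growing copy of the input (index walk with a mid-list
-- insert() after every full 254-byte group) by a single pass that buffers the current zero-free
-- group and appends it with its code byte to the output (objective: faster).

-- ===== PORT A =====
-- Literal port of A's while loop. State: the mutated list, len_data, zero_pos, zero_adds, i
-- (all counters start ≥ 0 and are only ever increased, so they are carried as Nat).
-- encode_list[i] is read with getD: the loop guard i < length makes it exact there.
-- fuel only makes the recursion structural; it starts at the list length, which always
-- exceeds the loop's strictly decreasing measure length - i, so the fuel-0 arm never runs.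
def loopA : Nat → List Int → Nat → Nat → Nat → Nat → List Int
  | 0, lst, _, _, _, _ => lst
  | fuel + 1, lst, len_data, zero_pos, zero_adds, i =>
    if i < lst.length then
      let temp := lst.getD i 0
      let lst1 := if temp = 0 then lst.set zero_pos (zero_adds : Int) else lst
      let zp1 := if temp = 0 then zero_pos + zero_adds else zero_pos
      let za1 := (if temp = 0 then 0 else zero_adds) + 1
      if 255 ≤ za1 then
        let lst2 := lst1.set zp1 255
        if i = len_data then lst2
        else loopA fuel (lst2.insertIdx (i + 1) 0) len_data (zp1 + za1) 1 (i + 2)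
      else loopA fuel lst1 len_data zp1 za1 (i + 1)
    else lst

def cobs_encoded (data_in : List Int) : List Int :=
  loopA ([0] ++ data_in ++ [0]).length ([0] ++ data_in ++ [0]) data_in.length 0 1 1

-- ===== PORT B =====
-- Literal port of Source B's for loop: structural recursion over the unread suffix of data_in
-- with the loop state (out, group).
def loopB : List Int → List Int → List Int → List Int
  | [], out, group => out ++ [((group.length : Int) + 1)] ++ group ++ [0]
  | b :: rest, out, group =>
    if b = 0 then loopB rest (out ++ [((group.length : Int) + 1)] ++ group) []
    else
      if (group ++ [b]).length = 254 then loopB rest (out ++ [255] ++ (group ++ [b])) []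
      else loopB rest out (group ++ [b])

def cobs_encoded_alt (data_in : List Int) : List Int :=
  loopB data_in [] []

-- ===== PRECONDITION & SPEC =====
-- On inputs where a full 254-byte group ends exactly at data index n-1-k (k = number of full
-- groups before it), A's break test 'i == len_data' — an index into the insert-grown list
-- compared against the original length — fires at the wrong position, so A returns the rest
-- of the data unencoded (or drops the final group's code byte); B encodes it normally, which
-- is the intended COBS output.
-- firedBreak tracks only the input's group structure (current group fill and the count of
-- completed full groups) and asks whether a full group ends at index (length - 1 - k).
-- (the List.rec form keeps the decidability evaluation shallow)
def firedBreak (l : List Int) : Nat → Nat → Bool :=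
  l.rec (fun _ _ => false) (fun x rest ih fill k =>
    if x = 0 then ih 0 k
    else if fill + 1 = 254 then (rest.length == k) || ih 0 (k + 1)
    else ih (fill + 1) k)

def D_cobs_encoded (data_in : List Int) : Prop := firedBreak data_in 0 0 = true
instance (data_in : List Int) : Decidable (D_cobs_encoded data_in) := by unfold D_cobs_encoded; infer_instance

def Spec_cobs_encoded (data_in : List Int) (out : List Int) : Prop :=
  ¬ D_cobs_encoded data_in → out = cobs_encoded_alt data_in
instance (data_in : List Int) (out : List Int) : Decidable (Spec_cobs_encoded data_in out) := by unfold Spec_cobs_encoded; infer_instance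

def pvDiffWitness_cobs_encoded : List Int := [1, 1, 1, 1, 1, 1, 1, 1, 1, 1, 1, 1, 1, 1, 1, 1, 1, 1, 1, 1, 1, 1, 1, 1, 1, 1, 1, 1, 1, 1, 1, 1, 1, 1, 1, 1, 1, 1, 1, 1, 1, 1, 1, 1, 1, 1, 1, 1, 1, 1, 1, 1, 1, 1, 1, 1, 1, 1, 1, 1, 1, 1, 1, 1, 1, 1, 1, 1, 1, 1, 1, 1, 1, 1, 1, 1, 1, 1, 1, 1, 1, 1, 1, 1, 1, 1, 1, 1, 1, 1, 1, 1, 1, 1, 1, 1, 1, 1, 1, 1, 1, 1, 1, 1, 1, 1, 1, 1, 1, 1, 1, 1, 1, 1, 1, 1, 1, 1, 1, 1, 1, 1, 1, 1, 1, 1, 1, 1, 1, 1, 1, 1, 1, 1, 1, 1, 1, 1, 1, 1, 1, 1, 1, 1, 1, 1, 1, 1, 1, 1, 1, 1, 1, 1, 1, 1, 1, 1, 1, 1, 1, 1, 1, 1, 1, 1, 1, 1, 1, 1, 1, 1, 1, 1, 1, 1, 1, 1, 1, 1, 1, 1, 1, 1, 1, 1, 1, 1, 1, 1, 1, 1, 1,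 1, 1, 1, 1, 1, 1, 1, 1, 1, 1, 1, 1, 1, 1, 1, 1, 1, 1, 1, 1, 1, 1, 1, 1, 1, 1, 1, 1, 1, 1, 1, 1, 1, 1, 1, 1, 1, 1, 1, 1, 1, 1, 1, 1, 1, 1, 1, 1, 1, 1, 1, 1, 1, 1, 1, 1, 1, 1, 1, 1, 1]
def pvDiffWitnessOut_cobs_encoded : (List Int) × (List Int) := ([255, 1, 1, 1, 1, 1, 1, 1, 1, 1, 1, 1, 1, 1, 1, 1, 1, 1, 1, 1, 1, 1, 1, 1, 1, 1, 1, 1, 1, 1, 1, 1, 1, 1, 1, 1, 1, 1, 1, 1, 1, 1, 1, 1, 1, 1, 1, 1, 1, 1, 1, 1, 1, 1, 1, 1, 1, 1, 1, 1, 1, 1, 1, 1, 1, 1, 1, 1, 1, 1, 1, 1, 1, 1, 1, 1, 1, 1, 1, 1, 1, 1, 1, 1, 1, 1, 1, 1, 1, 1, 1, 1, 1, 1, 1, 1, 1, 1, 1, 1, 1, 1, 1, 1, 1, 1, 1, 1, 1, 1, 1, 1, 1, 1, 1, 1, 1, 1, 1, 1, 1, 1, 1, 1, 1, 1, 1, 1,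 1, 1, 1, 1, 1, 1, 1, 1, 1, 1, 1, 1, 1, 1, 1, 1, 1, 1, 1, 1, 1, 1, 1, 1, 1, 1, 1, 1, 1, 1, 1, 1, 1, 1, 1, 1, 1, 1, 1, 1, 1, 1, 1, 1, 1, 1, 1, 1, 1, 1, 1, 1, 1, 1, 1, 1, 1, 1, 1, 1, 1, 1, 1, 1, 1, 1, 1, 1, 1, 1, 1, 1, 1, 1, 1, 1, 1, 1, 1, 1, 1, 1, 1, 1, 1, 1, 1, 1, 1, 1, 1, 1, 1, 1, 1, 1, 1, 1, 1, 1, 1, 1, 1, 1, 1, 1, 1, 1, 1, 1, 1, 1, 1, 1, 1, 1, 1, 1, 1, 1, 1, 1, 1, 1, 1, 1, 1, 0], [255, 1, 1, 1, 1, 1, 1, 1, 1, 1, 1, 1, 1, 1, 1, 1, 1, 1, 1, 1, 1, 1, 1, 1, 1, 1, 1, 1, 1, 1, 1, 1, 1, 1, 1, 1, 1, 1, 1, 1, 1, 1, 1, 1, 1, 1, 1, 1, 1, 1, 1, 1, 1, 1, 1, 1, 1, 1, 1, 1, 1, 1, 1, 1, 1, 1, 1, 1, 1, 1, 1, 1,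 1, 1, 1, 1, 1, 1, 1, 1, 1, 1, 1, 1, 1, 1, 1, 1, 1, 1, 1, 1, 1, 1, 1, 1, 1, 1, 1, 1, 1, 1, 1, 1, 1, 1, 1, 1, 1, 1, 1, 1, 1, 1, 1, 1, 1, 1, 1, 1, 1, 1, 1, 1, 1, 1, 1, 1, 1, 1, 1, 1, 1, 1, 1, 1, 1, 1, 1, 1, 1, 1, 1, 1, 1, 1, 1, 1, 1, 1, 1, 1, 1, 1, 1, 1, 1, 1, 1, 1, 1, 1, 1, 1, 1, 1, 1, 1, 1, 1, 1, 1, 1, 1, 1, 1, 1, 1, 1, 1, 1, 1, 1, 1, 1, 1, 1, 1, 1, 1, 1, 1, 1, 1, 1, 1, 1, 1, 1, 1, 1, 1, 1, 1, 1, 1, 1, 1, 1, 1, 1, 1, 1, 1, 1, 1, 1, 1, 1, 1, 1, 1, 1, 1, 1, 1, 1, 1, 1, 1, 1, 1, 1, 1, 1, 1, 1, 1, 1, 1, 1, 1, 1, 1, 1, 1, 1, 1, 1, 1, 1, 1, 1, 1, 1, 1, 0])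

-- ===== CLAIM (what is proved, stated in full; the proofs are below) =====
def Claim_unchanged_cobs_encoded : Prop := ∀ (data_in : List Int), Dom_cobs_encoded data_in → Spec_cobs_encoded data_in (cobs_encoded data_in)
def Claim_changed_cobs_encoded : Prop := Dom_cobs_encoded (pvDiffWitness_cobs_encoded) ∧ D_cobs_encoded (pvDiffWitness_cobs_encoded) ∧ cobs_encoded (pvDiffWitness_cobs_encoded) = pvDiffWitnessOut_cobs_encoded.1 ∧ cobs_encoded_alt (pvDiffWitness_cobs_encoded) = pvDiffWitnessOut_cobs_encoded.2 ∧ pvDiffWitnessOut_cobs_encoded.1 ≠ pvDiffWitnessOut_cobs_encoded.2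
def Claim_exact_cobs_encoded : Prop := ∀ (data_in : List Int), Dom_cobs_encoded data_in → D_cobs_encoded data_in → cobs_encoded data_in ≠ cobs_encoded_alt data_in

-- ===== LEMMAS AND PROOFS =====

-- Per-element unrolling of A's loop: suffix = unread input, block = bytes of the current group
-- already copied behind the code placeholder, acc = finished output prefix, k = inserts so far.
def specA' : List Int → List Int → List Int → Nat → List Int
  | [], block, acc, _ => acc ++ [((block.length : Int) + 1)] ++ block ++ [0]
  | x :: rest, block, acc, k =>
    if x = 0 then specA' rest [] (acc ++ [((block.length : Int) + 1)] ++ block) k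
    else if block.length = 253 then
      if rest.length = k then acc ++ [255] ++ block ++ [x] ++ rest ++ [0]
      else specA' rest [] (acc ++ [255] ++ block ++ [x]) (k + 1)
    else specA' rest (block ++ [x]) acc k

theorem firedBreak_nil (fill k : Nat) : firedBreak [] fill k = false := rfl
theorem firedBreak_cons (x : Int) (rest : List Int) (fill k : Nat) :
    firedBreak (x :: rest) fill k =
      (if x = 0 then firedBreak rest 0 k
       else if fill + 1 = 254 then (rest.length == k) || firedBreak rest 0 (k + 1)
       else firedBreak rest (fill + 1) k) := rfl

theorem getD_append_len {α : Type} [Inhabited α] (p u : List α) (j : Nat) (d : α) :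
    (p ++ u).getD (p.length + j) d = u.getD j d := by
  induction p with
  | nil => simp
  | cons a p ih =>
    have h : (a :: p).length + j = (p.length + j) + 1 := by simp; omega
    rw [List.cons_append, h, List.getD_cons_succ, ih]

theorem set_append_len {α : Type} (p : List α) (c : α) (t : List α) (v : α) :
    (p ++ c :: t).set p.length v = p ++ v :: t := by
  induction p with
  | nil => simp
  | cons a p ih => simp [List.set_cons_succ, ih]

theorem insertIdx_append_len {α : Type} (p t : List α) (v : α) :
    (p ++ t).insertIdx p.length v = p ++ v :: t := by
  induction p with
  | nil => simp
  | cons a p ih => simp [List.insertIdx_succ_cons, ih]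

theorem getD_mid (acc : List Int) (c : Int) (block u : List Int) :
    (acc ++ c :: (block ++ u)).getD (acc.length + 1 + block.length) 0 = u.getD 0 0 := by
  have h1 : acc.length + 1 + block.length = acc.length + (block.length + 1) := by omega
  rw [h1, getD_append_len, List.getD_cons_succ]
  simpa using getD_append_len block u 0 0

theorem loopA_stop (f : Nat) (lst : List Int) (a b c i : Nat) (h : ¬ i < lst.length) :
    loopA f lst a b c i = lst := by
  cases f <;> simp [loopA, h]

theorem loopA_spec :
    ∀ (suffix block acc : List Int) (c : Int) (k n zp za i f : Nat),
      zp = acc.length → za = block.length + 1 → i = acc.length + 1 + block.length →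
      suffix.length + 2 ≤ f →
      block.length ≤ 253 →
      n + k = acc.length + block.length + suffix.length →
      loopA f (acc ++ c :: (block ++ (suffix ++ [0]))) n zp za i = specA' suffix block acc k := by
  intro suffix
  induction suffix with
  | nil =>
    intro block acc c k n zp za i f hzp hza hi hf hble hn
    subst hzp hza hi
    obtain ⟨f', rfl⟩ : ∃ f', f = f' + 1 := ⟨f - 1, by omega⟩
    have hlt : acc.length + 1 + block.length
        < (acc ++ c :: (block ++ (([] : List Int) ++ [0]))).length := by
      simp; omega
    rw [loopA, if_pos hlt]
    have hg : (acc ++ c :: (block ++ (([] : List Int) ++ [0]))).getD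
        (acc.length + 1 + block.length) 0 = 0 := by
      rw [getD_mid]; rfl
    simp only [hg, if_true]
    rw [set_append_len]
    rw [if_neg (by omega : ¬ (255 : Nat) ≤ 0 + 1)]
    rw [loopA_stop _ _ _ _ _ _ (by simp; omega)]
    simp [specA', List.append_assoc, Nat.cast_add, Nat.cast_one]
  | cons x rest ihs =>
    intro block acc c k n zp za i f hzp hza hi hf hble hn
    subst hzp hza hi
    obtain ⟨f', rfl⟩ : ∃ f', f = f' + 1 := ⟨f - 1, by omega⟩
    simp only [List.length_cons] at hn hf
    have hlt : acc.length + 1 + block.length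
        < (acc ++ c :: (block ++ ((x :: rest) ++ [0]))).length := by
      simp; omega
    rw [loopA, if_pos hlt]
    have hg : (acc ++ c :: (block ++ ((x :: rest) ++ [0]))).getD
        (acc.length + 1 + block.length) 0 = x := by
      rw [getD_mid]; rfl
    by_cases hx : x = 0
    · subst hx
      simp only [hg, if_true]
      rw [set_append_len]
      rw [if_neg (by omega : ¬ (255 : Nat) ≤ 0 + 1)]
      rw [show ((block.length + 1 : Nat) : Int) = (block.length : Int) + 1 from by push_cast; ring]
      have hL : acc ++ ((block.length : Int) + 1) :: (block ++ ((0 :: rest) ++ [0]))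
          = (acc ++ [(block.length : Int) + 1] ++ block) ++ (0 : Int) :: (rest ++ [0]) := by
        simp
      rw [hL]
      rw [show specA' ((0 : Int) :: rest) block acc k
            = specA' rest [] (acc ++ [(block.length : Int) + 1] ++ block) k from by
          simp [specA']]
      exact ihs [] (acc ++ [(block.length : Int) + 1] ++ block) 0 k n
        (acc.length + (block.length + 1)) (0 + 1) (acc.length + 1 + block.length + 1) f'
        (by first | omega | (simp; try omega)) (by first | omega | (simp; try omega)) (by first | omega | (simp; try omega)) (by omega) (by first | omega | (simp; try omega)) (by first | omega | (simp; try omega))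
    · simp only [hg, if_neg hx]
      by_cases hb : block.length = 253
      · rw [if_pos (by omega : (255 : Nat) ≤ block.length + 1 + 1)]
        rw [set_append_len]
        by_cases hik : rest.length = k
        · rw [if_pos (by omega : acc.length + 1 + block.length = n)]
          simp [specA', hx, hb, hik, List.append_assoc]
        · rw [if_neg (by omega : ¬ acc.length + 1 + block.length = n)]
          have hL : acc ++ (255 : Int) :: (block ++ ((x :: rest) ++ [0]))
              = (acc ++ [(255 : Int)] ++ block ++ [x]) ++ (rest ++ [0]) := by
            simp
          rw [hL]
          rw [show acc.length + 1 + block.length + 1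
                = (acc ++ [(255 : Int)] ++ block ++ [x]).length from by simp; omega]
          rw [insertIdx_append_len]
          rw [show specA' (x :: rest) block acc k
                = specA' rest [] (acc ++ [255] ++ block ++ [x]) (k + 1) from by
              simp [specA', hx, hb, hik]]
          exact ihs [] (acc ++ [(255 : Int)] ++ block ++ [x]) 0 (k + 1) n
            (acc.length + (block.length + 1 + 1)) 1 (acc.length + 1 + block.length + 2) f'
            (by first | omega | (simp; try omega)) (by first | omega | (simp; try omega)) (by first | omega | (simp; try omega)) (by omega) (by first | omega | (simp; try omega)) (by first | omega | (simp; try omega))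
      · rw [if_neg (by omega : ¬ (255 : Nat) ≤ block.length + 1 + 1)]
        have hL : acc ++ c :: (block ++ ((x :: rest) ++ [0]))
            = acc ++ c :: ((block ++ [x]) ++ (rest ++ [0])) := by
          simp
        rw [hL]
        rw [show specA' (x :: rest) block acc k = specA' rest (block ++ [x]) acc k from by
            simp [specA', hx, hb]]
        exact ihs (block ++ [x]) acc c k n
          acc.length (block.length + 1 + 1) (acc.length + 1 + block.length + 1) f'
          rfl (by simp) (by simp; omega) (by omega) (by simp; omega) (by simp; omega)

theorem cobs_eq_specA (data : List Int) : cobs_encoded data = specA' data [] [] 0 := by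
  have h := loopA_spec data [] [] 0 0 data.length 0 1 1 ([0] ++ data ++ [0]).length
    (by simp) (by simp) (by simp) (by simp) (by simp) (by simp)
  simpa [cobs_encoded] using h

-- When the break never fires, A's unrolling is exactly B's loop.
theorem specA_eq_loopB :
    ∀ (suffix block acc : List Int) (k : Nat),
      firedBreak suffix block.length k = false →
      specA' suffix block acc k = loopB suffix acc block := by
  intro suffix
  induction suffix with
  | nil => intro block acc k _; simp [specA', loopB]
  | cons x rest ih =>
    intro block acc k hf
    by_cases hx : x = 0
    · subst hx
      simp only [firedBreak_cons, if_true] at hf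
      simp only [specA', loopB, if_true]
      exact ih [] (acc ++ [((block.length : Int) + 1)] ++ block) k hf
    · by_cases hb : block.length = 253
      · have h254 : (block ++ [x]).length = 254 := by simp [hb]
        rw [firedBreak_cons, if_neg hx, hb, if_pos (by norm_num : (253 : Nat) + 1 = 254)] at hf
        by_cases hik : rest.length = k
        · simp [hik] at hf
        · replace hf := (Bool.or_eq_false_iff.mp hf).2
          simp only [specA', loopB, if_neg hx, if_neg hik, hb, if_pos rfl, if_pos h254]
          rw [List.append_assoc (acc ++ [255]) block [x]]
          exact ih [] (acc ++ [255] ++ (block ++ [x])) (k + 1) hf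
      · have h254 : ¬ (block ++ [x]).length = 254 := by simp; omega
        simp only [firedBreak_cons, if_neg hx, if_neg (by omega : ¬ block.length + 1 = 254)] at hf
        simp only [specA', loopB, if_neg hx, if_neg hb, if_neg h254]
        rw [← ih (block ++ [x]) acc k (by simpa using hf)]

-- Output of B's loop is at least acc + group + suffix + 2 long (code byte and delimiter).
theorem loopB_len_lower :
    ∀ (suffix acc group : List Int),
      acc.length + group.length + suffix.length + 2 ≤ (loopB suffix acc group).length := by
  intro suffix
  induction suffix with
  | nil => intro acc group; simp [loopB]; omega
  | cons x rest ih =>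
    intro acc group
    by_cases hx : x = 0
    · subst hx
      simp only [loopB, if_true]
      have := ih (acc ++ [((group.length : Int) + 1)] ++ group) []
      simp at this ⊢; omega
    · by_cases h254 : (group ++ [x]).length = 254
      · simp only [loopB, if_neg hx, if_pos h254]
        have := ih (acc ++ [255] ++ (group ++ [x])) []
        simp at this ⊢; omega
      · simp only [loopB, if_neg hx, if_neg h254]
        have := ih acc (group ++ [x])
        simp at this ⊢; omega

-- When the break fires, A's unrolling is strictly shorter than B's loop output.
theorem specA_lt_loopB :
    ∀ (suffix block acc : List Int) (k : Nat),
      firedBreak suffix block.length k = true →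
      (specA' suffix block acc k).length < (loopB suffix acc block).length := by
  intro suffix
  induction suffix with
  | nil => intro block acc k hf; simp [firedBreak_nil] at hf
  | cons x rest ih =>
    intro block acc k hf
    by_cases hx : x = 0
    · subst hx
      simp only [firedBreak_cons, if_true] at hf
      simp only [specA', loopB, if_true]
      exact ih [] (acc ++ [((block.length : Int) + 1)] ++ block) k hf
    · by_cases hb : block.length = 253
      · rw [firedBreak_cons, if_neg hx, hb, if_pos (by norm_num : (253 : Nat) + 1 = 254)] at hf
        by_cases hik : rest.length = k
        · simp only [specA', loopB, if_neg hx, if_pos hik, hb, if_pos rfl,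
            if_pos (by simp [hb] : (block ++ [x]).length = 254)]
          have hlow := loopB_len_lower rest (acc ++ [255] ++ (block ++ [x])) []
          simp [hb, hik] at hlow ⊢
          omega
        · replace hf : firedBreak rest 0 (k + 1) = true := by simpa [hik] using hf
          simp only [specA', loopB, if_neg hx, if_neg hik, hb, if_pos rfl,
            if_pos (by simp [hb] : (block ++ [x]).length = 254)]
          have := ih [] (acc ++ [255] ++ (block ++ [x])) (k + 1) hf
          simpa [List.append_assoc] using this
      · have h254 : ¬ (block ++ [x]).length = 254 := by simp; omega
        simp only [firedBreak_cons, if_neg hx, if_neg (by omega : ¬ block.length + 1 = 254)] at hf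
        simp only [specA', loopB, if_neg hx, if_neg hb, if_neg h254]
        exact ih (block ++ [x]) acc k (by simpa using hf)

-- ===== VERDICT (by name: the statements are the Claim_ definitions above) =====
theorem cobs_encoded_spec : Claim_unchanged_cobs_encoded := by
  intro data _ hnd
  unfold D_cobs_encoded at hnd
  rw [cobs_eq_specA]
  unfold cobs_encoded_alt
  exact specA_eq_loopB data [] [] 0 (by simpa using Bool.of_not_eq_true hnd)

set_option maxRecDepth 100000 in
set_option maxHeartbeats 1000000 in
theorem cobs_encoded_changed : Claim_changed_cobs_encoded := by
  unfold Claim_changed_cobs_encoded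
  refine ⟨by decide, by decide, ?_, by decide, by decide⟩
  rw [cobs_eq_specA]; decide

theorem cobs_encoded_tight : Claim_exact_cobs_encoded := by
  intro data _ hd
  unfold D_cobs_encoded at hd
  rw [cobs_eq_specA]
  unfold cobs_encoded_alt
  intro heq
  exact absurd (congrArg List.length heq) (Nat.ne_of_lt (specA_lt_loopB data [] [] 0 hd))
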